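-- pv_equiv track=rewrite | github.com/jarmak-personal/vibeSpatial | src/vibespatial/io/osm_gpu.py | _chain_ways_to_rings
-- ===== SOURCE A (Python) =====
-- def _chain_ways_to_rings(way_ref_lists: list[list[int]]) -> list[list[int]]:
--     """Chain multiple open Ways into closed rings by matching endpoints.
--
--     Algorithm:
--     1. Start with any unused Way.  current_ring = way_refs.copy()
--     2. While ring is not closed (first != last):
--        a. Find a Way whose first_ref == current_ring[-1] -> append (same direction)
--        b. Or whose last_ref == current_ring[-1] -> append reversed
--        c. If no match found, close the ring forcibly and start a new one
--     3. Return list of closed rings.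
--
--     This is O(ways_per_ring^2) worst case but typically < 10 Ways per ring.
--     """
--     if not way_ref_lists:
--         return []
--
--     # Filter out single-ref ways (degenerate)
--     ways = [refs[:] for refs in way_ref_lists if len(refs) >= 2]
--     if not ways:
--         return []
--
--     rings: list[list[int]] = []
--     used = [False] * len(ways)
--
--     while True:
--         # Find the first unused Way to start a new ring
--         start_idx = -1
--         for i, u in enumerate(used):
--             if not u:
--                 start_idx = i
--                 break
--         if start_idx == -1:
--             break  # All ways consumed
--
--         used[start_idx] = True
--         ring = ways[start_idx][:]
--
--         # Check if this single Way is already closed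
--         if ring[0] == ring[-1] and len(ring) >= 4:
--             rings.append(ring)
--             continue
--
--         # Try to extend the ring by matching endpoints
--         changed = True
--         while changed and ring[0] != ring[-1]:
--             changed = False
--             for i, w in enumerate(ways):
--                 if used[i]:
--                     continue
--                 if w[0] == ring[-1]:
--                     # Same direction: append without duplicating the junction node
--                     ring.extend(w[1:])
--                     used[i] = True
--                     changed = True
--                     break
--                 elif w[-1] == ring[-1]:
--                     # Reversed direction: append reversed without duplicating
--                     ring.extend(reversed(w[:-1]))
--                     used[i] = True
--                     changed = True
--                     break
--
--         # Force-close if still open (degenerate data)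
--         if ring[0] != ring[-1]:
--             ring.append(ring[0])
--
--         if len(ring) >= 4:
--             rings.append(ring)
--
--     return rings
-- ===== SOURCE B (Python) =====
-- def _chain_ways_to_rings(way_ref_lists: list[list[int]]) -> list[list[int]]:
--     """Chain open Ways into closed rings by endpoint matching, using an
--     endpoint->way-index hash index instead of rescanning all ways per step."""
--     ways = [refs[:] for refs in way_ref_lists if len(refs) >= 2]
--     if not ways:
--         return []
--
--     # Index every way (once per distinct endpoint value) by its endpoints;
--     # bucket lists are in increasing index order by construction.
--     pairs = [(v, i) for i, w in enumerate(ways)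
--              for v in ([w[0]] if w[0] == w[-1] else [w[0], w[-1]])]
--     ep: dict[int, list[int]] = {}
--     for v, i in pairs:
--         ep.setdefault(v, []).append(i)
--
--     used = [False] * len(ways)
--     rings: list[list[int]] = []
--     for start in range(len(ways)):
--         if used[start]:
--             continue
--         used[start] = True
--         ring = ways[start][:]
--         if not (ring[0] == ring[-1] and len(ring) >= 4):
--             while ring[0] != ring[-1]:
--                 i = next((j for j in ep.get(ring[-1], []) if not used[j]), None)
--                 if i is None:
--                     break
--                 used[i] = True
--                 w = ways[i]
--                 if w[0] == ring[-1]: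
--                     ring += w[1:]
--                 else:
--                     ring += w[-2::-1]
--             if ring[0] != ring[-1]:
--                 ring.append(ring[0])
--         if len(ring) >= 4:
--             rings.append(ring)
--     return rings
-- ===== Notes on version B (the rewrite author's own statement) =====
-- stated objective: alternative
-- what changed: B builds a hash index from endpoint value to the (increasing) list of way indices having that endpoint once up front, so each chaining step scans only the candidate bucket for the current ring tail instead of rescanning every way, and the outer loop walks the index range once instead of repeatedly searching for the first unused way.
import Mathlib
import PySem

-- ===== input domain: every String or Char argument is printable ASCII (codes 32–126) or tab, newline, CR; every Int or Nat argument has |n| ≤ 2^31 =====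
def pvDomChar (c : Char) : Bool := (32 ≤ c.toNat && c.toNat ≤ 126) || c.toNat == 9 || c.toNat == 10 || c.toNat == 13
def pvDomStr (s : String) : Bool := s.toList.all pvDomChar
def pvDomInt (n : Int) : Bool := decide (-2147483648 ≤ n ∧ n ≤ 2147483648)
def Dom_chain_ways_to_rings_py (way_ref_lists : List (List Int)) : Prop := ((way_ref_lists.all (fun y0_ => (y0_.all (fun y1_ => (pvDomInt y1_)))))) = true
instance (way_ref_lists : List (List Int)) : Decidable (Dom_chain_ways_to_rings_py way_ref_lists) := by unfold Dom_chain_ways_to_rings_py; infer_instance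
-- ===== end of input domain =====

-- B replaces A's per-step rescan of all ways with a prebuilt endpoint->indices hash
-- index, so each chaining step only scans the bucket of candidate ways sharing the
-- needed endpoint, and its outer loop walks the index range once (objective: alternative).

-- w[0] / w[-1] / ring[-1]: every list these are applied to has length ≥ 2 (the ports
-- filter short ways first and rings only grow), so headD/getLastD 0 is exact there.
def pvFirst (l : List Int) : Int := l.headD 0
def pvLast (l : List Int) : Int := l.getLastD 0

-- ===== PORT A =====
-- A's inner `for i, w in enumerate(ways): … break` — first unused way matching tail t.
def chainA_scan (ways : List (List Int)) (used : List Bool) (t : Int) : Option Nat :=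
  (List.range ways.length).find? (fun i =>
    !(used.getD i true) && (pvFirst (ways.getD i []) == t || pvLast (ways.getD i []) == t))

-- A's `while changed and ring[0] != ring[-1]` extension loop; each pass marks one way
-- used, so fuel = number of ways is enough (fuel exhaustion is unreachable).
def chainA_extend (ways : List (List Int)) : Nat → List Bool → List Int → List Bool × List Int
  | 0, used, ring => (used, ring)
  | fuel+1, used, ring =>
    if pvFirst ring = pvLast ring then (used, ring)
    else
      match chainA_scan ways used (pvLast ring) with
      | none => (used, ring)
      | some i =>
        let w := ways.getD i []
        let ring' := if pvFirst w = pvLast ring then ring ++ w.drop 1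
                     else ring ++ w.dropLast.reverse
        chainA_extend ways fuel (used.set i true) ring'

-- A's `for i, u in enumerate(used): if not u: start_idx = i; break`
def chainA_firstUnused (used : List Bool) : Option Nat :=
  (List.range used.length).find? (fun i => !(used.getD i true))

-- A's outer `while True`; each iteration marks ≥ 1 way used, fuel = number of ways.
def chainA_outer (ways : List (List Int)) : Nat → List Bool → List (List Int) → List (List Int)
  | 0, _, acc => acc
  | fuel+1, used, acc =>
    match chainA_firstUnused used with
    | none => acc
    | some s =>
      let used1 := used.set s true
      let ring := ways.getD s []
      if pvFirst ring = pvLast ring ∧ 4 ≤ ring.length then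
        chainA_outer ways fuel used1 (acc ++ [ring])
      else
        let p := chainA_extend ways ways.length used1 ring
        let ring3 := if pvFirst p.2 ≠ pvLast p.2 then p.2 ++ [pvFirst p.2] else p.2
        chainA_outer ways fuel p.1 (if 4 ≤ ring3.length then acc ++ [ring3] else acc)

def chain_ways_to_rings_py (way_ref_lists : List (List Int)) : List (List Int) :=
  if way_ref_lists = [] then []
  else
    let ways := way_ref_lists.filter (fun r => 2 ≤ r.length)
    if ways = [] then []
    else chainA_outer ways ways.length (List.replicate ways.length false) []

-- ===== PORT B =====
-- Source B's `pairs` comprehension: (endpoint value, way index), each way once per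
-- distinct endpoint, indices increasing.
def chainB_pairs (ways : List (List Int)) : List (Int × Nat) :=
  ways.zipIdx.flatMap (fun iw =>
    if pvFirst iw.1 = pvLast iw.1 then [(pvFirst iw.1, iw.2)]
    else [(pvFirst iw.1, iw.2), (pvLast iw.1, iw.2)])

-- Source B's `ep.setdefault(v, []).append(i)` loop
def chainB_buildEp (ways : List (List Int)) : PySem.Dict Int (List Nat) :=
  (chainB_pairs ways).foldl (fun d p => d.modify p.1 [] (· ++ [p.2])) PySem.Dict.empty

-- Source B's `next((j for j in ep.get(t, []) if not used[j]), None)`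
def chainB_find (ep : PySem.Dict Int (List Nat)) (used : List Bool) (t : Int) : Option Nat :=
  (ep.getD t []).find? (fun j => !(used.getD j true))

-- Source B's `while ring[0] != ring[-1]` loop; same fuel bound as A's (unreachable).
def chainB_extend (ways : List (List Int)) (ep : PySem.Dict Int (List Nat)) :
    Nat → List Bool → List Int → List Bool × List Int
  | 0, used, ring => (used, ring)
  | fuel+1, used, ring =>
    if pvFirst ring = pvLast ring then (used, ring)
    else
      match chainB_find ep used (pvLast ring) with
      | none => (used, ring)
      | some i =>
        let w := ways.getD i []
        let ring' := if pvFirst w = pvLast ring then ring ++ w.drop 1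
                     else ring ++ w.dropLast.reverse
        chainB_extend ways ep fuel (used.set i true) ring'

-- body of Source B's `for start in range(len(ways))`
def chainB_step (ways : List (List Int)) (ep : PySem.Dict Int (List Nat))
    (st : List Bool × List (List Int)) (start : Nat) : List Bool × List (List Int) :=
  if st.1.getD start true then st
  else
    let used1 := st.1.set start true
    let ring := ways.getD start []
    let p :=
      if pvFirst ring = pvLast ring ∧ 4 ≤ ring.length then (used1, ring)
      else
        let q := chainB_extend ways ep ways.length used1 ring
        (q.1, if pvFirst q.2 ≠ pvLast q.2 then q.2 ++ [pvFirst q.2] else q.2)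
    (p.1, if 4 ≤ p.2.length then st.2 ++ [p.2] else st.2)

def chain_ways_to_rings_py_alt (way_ref_lists : List (List Int)) : List (List Int) :=
  let ways := way_ref_lists.filter (fun r => 2 ≤ r.length)
  if ways = [] then []
  else
    ((List.range ways.length).foldl (chainB_step ways (chainB_buildEp ways))
      (List.replicate ways.length false, [])).2

-- ===== PRECONDITION & SPEC =====
def Spec_chain_ways_to_rings_py (way_ref_lists : List (List Int)) (out : List (List Int)) : Prop := out = chain_ways_to_rings_py_alt way_ref_lists
instance (way_ref_lists : List (List Int)) (out : List (List Int)) : Decidable (Spec_chain_ways_to_rings_py way_ref_lists out) := by unfold Spec_chain_ways_to_rings_py; infer_instance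

-- ===== CLAIM (what is proved, stated in full; the proofs are below) =====
def Claim_equal_chain_ways_to_rings_py : Prop := ∀ (way_ref_lists : List (List Int)), Dom_chain_ways_to_rings_py way_ref_lists → Spec_chain_ways_to_rings_py way_ref_lists (chain_ways_to_rings_py way_ref_lists)

-- ===== LEMMAS AND PROOFS =====

-- a way matches tail t (by either endpoint)
def pvMatch (ways : List (List Int)) (t : Int) (i : Nat) : Bool :=
  pvFirst (ways.getD i []) == t || pvLast (ways.getD i []) == t

-- B's pairs list, filtered to key t and projected, is the matching-index list
theorem pairs_filter_map (ways : List (List Int)) (t : Int) :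
    ((chainB_pairs ways).filter (fun p => p.1 == t)).map (·.2) =
      (List.range ways.length).filter (fun i => pvMatch ways t i) := by
  induction ways using List.reverseRecOn with
  | nil => simp [chainB_pairs]
  | append_singleton l w ih =>
    have hpairs : chainB_pairs (l ++ [w]) =
        chainB_pairs l ++ (if pvFirst w = pvLast w then [(pvFirst w, l.length)]
          else [(pvFirst w, l.length), (pvLast w, l.length)]) := by
      simp [chainB_pairs, List.zipIdx_append]
    have hfil : (List.range l.length).filter (fun i => pvMatch (l ++ [w]) t i) =
        (List.range l.length).filter (fun i => pvMatch l t i) := by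
      apply List.filter_congr
      intro i hi
      have hi' : i < l.length := List.mem_range.mp hi
      simp [pvMatch, List.getD_eq_getElem?_getD, List.getElem?_append_left hi']
    have hlast : pvMatch (l ++ [w]) t l.length = (pvFirst w == t || pvLast w == t) := by
      have : (l ++ [w]).getD l.length [] = w := by
        rw [List.getD_append_right l [w] [] l.length (le_refl _)]
        simp
      rw [pvMatch, this]
    have key : ∀ n : Nat, ((if pvFirst w = pvLast w then [(pvFirst w, n)]
          else [(pvFirst w, n), (pvLast w, n)]).filter (fun p => p.1 == t)).map (·.2) =
        if (pvFirst w == t || pvLast w == t) then [n] else [] := by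
      intro n
      by_cases h1 : pvFirst w = pvLast w <;> by_cases h2 : pvFirst w = t <;>
        by_cases h3 : pvLast w = t <;> simp_all
    rw [hpairs, List.length_append, List.length_singleton, List.range_succ,
        List.filter_append, List.filter_append, List.map_append, ih, hfil]
    congr 1
    rw [key l.length]
    have hsing : List.filter (fun i => pvMatch (l ++ [w]) t i) [l.length] =
        if pvMatch (l ++ [w]) t l.length then [l.length] else [] := by
      cases h : pvMatch (l ++ [w]) t l.length <;> simp [List.filter, h]
    rw [hsing, hlast]

-- B's bucket for t is exactly the matching indices, in increasing order
theorem buildEp_getD (ways : List (List Int)) (t : Int) :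
    (chainB_buildEp ways).getD t [] =
      (List.range ways.length).filter (fun i => pvMatch ways t i) := by
  rw [chainB_buildEp, PySem.Dict.getD_foldl_modify_append, PySem.Dict.getD_empty,
      List.nil_append, pairs_filter_map]

theorem find?_filter' {α : Type} (l : List α) (p q : α → Bool) :
    (l.filter p).find? q = l.find? (fun x => q x && p x) := by
  induction l with
  | nil => rfl
  | cons x xs ih =>
    by_cases hp : p x <;> by_cases hq : q x <;>
      simp [hp, hq, ih]

-- the bucket scan equals A's global scan
theorem find_eq_scan (ways : List (List Int)) (used : List Bool) (t : Int) :
    chainB_find (chainB_buildEp ways) used t = chainA_scan ways used t := by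
  rw [chainB_find, buildEp_getD, find?_filter', chainA_scan]
  rfl

-- the two extension loops run in lockstep
theorem extend_eq (ways : List (List Int)) :
    ∀ (fuel : Nat) (used : List Bool) (ring : List Int),
      chainA_extend ways fuel used ring = chainB_extend ways (chainB_buildEp ways) fuel used ring := by
  intro fuel
  induction fuel with
  | zero => intro used ring; rfl
  | succ n ih =>
    intro used ring
    rw [chainA_extend, chainB_extend, find_eq_scan]
    by_cases h : pvFirst ring = pvLast ring
    · rw [if_pos h, if_pos h]
    · rw [if_neg h, if_neg h]
      cases chainA_scan ways used (pvLast ring) with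
      | none => rfl
      | some i => exact ih _ _

-- flags only move from false to true
theorem getD_set_true_of (used : List Bool) (j i : Nat)
    (h : used.getD i true = true) : (used.set j true).getD i true = true := by
  rw [List.getD_eq_getElem?_getD, List.getElem?_set]
  rw [List.getD_eq_getElem?_getD] at h
  by_cases hji : j = i
  · subst hji; rw [if_pos rfl]; split_ifs <;> rfl
  · simp only [if_neg hji]; exact h

theorem getD_set_true_self (used : List Bool) (j : Nat) (hj : j < used.length) :
    (used.set j true).getD j true = true := by
  rw [List.getD_eq_getElem?_getD, List.getElem?_set]
  simp [hj]

theorem getD_false_lt (used : List Bool) (j : Nat)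
    (h : used.getD j true = false) : j < used.length := by
  by_contra hge
  rw [List.getD_eq_getElem?_getD, List.getElem?_eq_none (by omega)] at h
  simp at h

-- extendA only sets flags to true
theorem extend_mono (ways : List (List Int)) :
    ∀ (fuel : Nat) (used : List Bool) (ring : List Int) (i : Nat),
      used.getD i true = true → (chainA_extend ways fuel used ring).1.getD i true = true := by
  intro fuel
  induction fuel with
  | zero => intro used ring i h; exact h
  | succ n ih =>
    intro used ring i h
    rw [chainA_extend]
    by_cases hc : pvFirst ring = pvLast ring
    · rw [if_pos hc]; exact h
    · rw [if_neg hc]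
      cases hs : chainA_scan ways used (pvLast ring) with
      | none => exact h
      | some j => exact ih _ _ _ (getD_set_true_of used j i h)

theorem extend_len (ways : List (List Int)) :
    ∀ (fuel : Nat) (used : List Bool) (ring : List Int),
      (chainA_extend ways fuel used ring).1.length = used.length := by
  intro fuel
  induction fuel with
  | zero => intro used ring; rfl
  | succ n ih =>
    intro used ring
    rw [chainA_extend]
    by_cases hc : pvFirst ring = pvLast ring
    · rw [if_pos hc]
    · rw [if_neg hc]
      cases hs : chainA_scan ways used (pvLast ring) with
      | none => rfl
      | some j => rw [ih]; exact List.length_set ..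

theorem count_false_set_true_le (l : List Bool) (i : Nat) :
    (l.set i true).count false ≤ l.count false := by
  induction l generalizing i with
  | nil => simp
  | cons x xs ih =>
    cases i with
    | zero => cases x <;> simp
    | succ k =>
      have := ih k
      cases x <;> simp <;> omega

theorem count_false_set_true_lt (l : List Bool) (i : Nat)
    (h : l.getD i true = false) : (l.set i true).count false < l.count false := by
  induction l generalizing i with
  | nil => simp at h
  | cons x xs ih =>
    cases i with
    | zero =>
      simp at h; subst h
      simp
    | succ k =>
      have := ih k (by simpa using h)
      cases x <;> simp <;> omega

theorem extend_countFalse (ways : List (List Int)) :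
    ∀ (fuel : Nat) (used : List Bool) (ring : List Int),
      (chainA_extend ways fuel used ring).1.count false ≤ used.count false := by
  intro fuel
  induction fuel with
  | zero => intro used ring; exact le_refl _
  | succ n ih =>
    intro used ring
    rw [chainA_extend]
    by_cases hc : pvFirst ring = pvLast ring
    · rw [if_pos hc]
    · rw [if_neg hc]
      cases hs : chainA_scan ways used (pvLast ring) with
      | none => exact le_refl _
      | some j => exact le_trans (ih _ _) (count_false_set_true_le used j)

-- find? over a strictly increasing index list returns the least satisfying element
theorem find?_sorted {l : List Nat} {p : Nat → Bool} {j : Nat}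
    (hs : l.Pairwise (· < ·)) (hj : j ∈ l) (hpj : p j = true)
    (hmin : ∀ i, i < j → p i = false) : l.find? p = some j := by
  induction l with
  | nil => cases hj
  | cons a as ih =>
    rcases List.mem_cons.mp hj with rfl | hmem
    · simp [hpj]
    · have haj : a < j := (List.pairwise_cons.mp hs).1 j hmem
      rw [List.find?_cons, hmin a haj]
      exact ih (List.pairwise_cons.mp hs).2 hmem

theorem firstUnused_some {used : List Bool} {j : Nat}
    (hj : used.getD j true = false) (hmin : ∀ i, i < j → used.getD i true = true) :
    chainA_firstUnused used = some j := by
  have hjlen : j < used.length := getD_false_lt used j hj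
  apply find?_sorted List.pairwise_lt_range (List.mem_range.mpr hjlen)
  · rw [hj]; rfl
  · intro i hi; rw [hmin i hi]; rfl

theorem firstUnused_none {used : List Bool}
    (h : ∀ i, used.getD i true = true) : chainA_firstUnused used = none := by
  apply List.find?_eq_none.mpr
  intro i _
  rw [h i]
  simp

-- A's repeated first-unused search equals B's for-loop over indices
theorem outer_eq (ways : List (List Int)) :
    ∀ (l : List Nat) (fuel : Nat) (used : List Bool) (acc : List (List Int)),
      l.Pairwise (· < ·) →
      (∀ i ∈ l, i < used.length) →
      (∀ i, i ∉ l → used.getD i true = true) →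
      used.count false ≤ fuel →
      chainA_outer ways fuel used acc =
        (l.foldl (chainB_step ways (chainB_buildEp ways)) (used, acc)).2 := by
  intro l
  induction l with
  | nil =>
    intro fuel used acc _ _ hall _
    have hnone := firstUnused_none (fun i => hall i (by simp))
    cases fuel with
    | zero => rfl
    | succ n => rw [chainA_outer, hnone]; rfl
  | cons j rest ih =>
    intro fuel used acc hs hlen hall hcf
    rw [List.foldl_cons]
    by_cases hu : used.getD j true = true
    · -- B skips j; A's state unchanged
      have hstep : chainB_step ways (chainB_buildEp ways) (used, acc) j = (used, acc) := by
        rw [chainB_step]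
        have : ((used, acc) : List Bool × List (List Int)).1.getD j true = true := hu
        rw [if_pos this]
      rw [hstep]
      exact ih fuel used acc (List.pairwise_cons.mp hs).2
        (fun i hi => hlen i (List.mem_cons_of_mem _ hi))
        (fun i hi => by
          by_cases hij : i = j
          · subst hij; exact hu
          · exact hall i (by simp [hij, hi]))
        hcf
    · -- j is the first unused index; both sides process it
      have hu' : used.getD j true = false := by
        cases h : used.getD j true with
        | true => exact absurd h hu
        | false => rfl
      have hjlen : j < used.length := getD_false_lt used j hu'
      have hmin : ∀ i, i < j → used.getD i true = true := by
        intro i hij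
        apply hall
        intro hmem
        rcases List.mem_cons.mp hmem with rfl | hr
        · omega
        · have := (List.pairwise_cons.mp hs).1 i hr
          omega
      have hfu := firstUnused_some hu' hmin
      have hcf1 : 1 ≤ used.count false := by
        have := count_false_set_true_lt used j hu'
        omega
      cases fuel with
      | zero => omega
      | succ n =>
        rw [chainA_outer, hfu]
        have hcond : ¬(((used, acc) : List Bool × List (List Int)).1.getD j true = true) := hu
        dsimp only [chainB_step]
        rw [if_neg hcond]
        rw [← extend_eq ways]
        by_cases hclosed : pvFirst (ways.getD j []) = pvLast (ways.getD j []) ∧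
            4 ≤ (ways.getD j []).length
        · rw [if_pos hclosed, if_pos hclosed, if_pos hclosed.2]
          exact ih n (used.set j true) (acc ++ [ways.getD j []]) (List.pairwise_cons.mp hs).2
            (fun i hi => by rw [List.length_set]; exact hlen i (List.mem_cons_of_mem _ hi))
            (fun i hi => by
              by_cases hij : i = j
              · subst hij; exact getD_set_true_self used i hjlen
              · exact getD_set_true_of used j i (hall i (by simp [hij, hi])))
            (by have := count_false_set_true_lt used j hu'; omega)
        · rw [if_neg hclosed, if_neg hclosed]
          exact ih n (chainA_extend ways ways.length (used.set j true) (ways.getD j [])).1 _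
            (List.pairwise_cons.mp hs).2
            (fun i hi => by
              rw [extend_len, List.length_set]
              exact hlen i (List.mem_cons_of_mem _ hi))
            (fun i hi => by
              by_cases hij : i = j
              · subst hij
                exact extend_mono ways _ _ _ _ (getD_set_true_self used i hjlen)
              · exact extend_mono ways _ _ _ _
                  (getD_set_true_of used j i (hall i (by simp [hij, hi]))))
            (by
              have h1 := extend_countFalse ways ways.length (used.set j true) (ways.getD j [])
              have h2 := count_false_set_true_lt used j hu'
              omega)

-- ===== VERDICT (by name: the statement is the Claim_ definition above) =====
theorem chain_ways_to_rings_py_spec : Claim_equal_chain_ways_to_rings_py := by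
  intro wl _
  unfold Spec_chain_ways_to_rings_py chain_ways_to_rings_py chain_ways_to_rings_py_alt
  by_cases hnil : wl = []
  · simp [hnil]
  · simp only [if_neg hnil]
    by_cases hwe : wl.filter (fun r => 2 ≤ r.length) = []
    · simp [hwe]
    · simp only [if_neg hwe]
      apply outer_eq _ _ _ _ _ List.pairwise_lt_range
      · intro i hi
        rw [List.length_replicate]
        exact List.mem_range.mp hi
      · intro i hi
        have hge : (wl.filter (fun r => 2 ≤ r.length)).length ≤ i := by
          by_contra h
          exact hi (List.mem_range.mpr (by omega))
        rw [List.getD_eq_getElem?_getD, List.getElem?_eq_none (by simpa using hge)]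
        rfl
      · rw [List.count_replicate]
        simp
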